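-- pv_equiv track=rewrite | github.com/Clear-Love/leetcode | interview/17.18.py | shortestSeq
-- ===== SOURCE A (Python) =====
-- from collections import Counter, defaultdict
-- from typing import List
--
-- def shortestSeq(big: List[int], small: List[int]) -> List[int]:
--     t = set(small)
--     k = len(small)
--     dic = defaultdict(int)
--     l, r = 0, 0
--     res = []
--     while r < len(big):
--         if big[r] in t:
--             dic[big[r]] +=1
--         while len(dic) == k:
--             if not res or  r - l < res[1] - res[0]:
--                 res = [l, r]
--             if big[l] in t:
--                 dic[big[l]] -=1
--             if dic[big[l]] == 0:
--                 dic.pop(big[l])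
--             l +=1
--         r +=1
--     return res
-- ===== SOURCE B (Python) =====
-- from typing import List
--
-- def shortestSeq(big: List[int], small: List[int]) -> List[int]:
--     t = set(small)
--     k = len(small)
--     last = {}
--     res = []
--     for r, x in enumerate(big):
--         if x in t:
--             last[x] = r
--         if len(last) == k:
--             l = min(last.values())
--             if not res or r - l < res[1] - res[0]:
--                 res = [l, r]
--     return res
-- ===== Notes on version B (the rewrite author's own statement) =====
-- stated objective: alternative
-- what changed: Replaces A's count-dict sliding window with a shrinking left pointer by a single enumerate pass that keeps each required value's most recent index in a dict and takes the minimum of those indices as the window's left end.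
import Mathlib
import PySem

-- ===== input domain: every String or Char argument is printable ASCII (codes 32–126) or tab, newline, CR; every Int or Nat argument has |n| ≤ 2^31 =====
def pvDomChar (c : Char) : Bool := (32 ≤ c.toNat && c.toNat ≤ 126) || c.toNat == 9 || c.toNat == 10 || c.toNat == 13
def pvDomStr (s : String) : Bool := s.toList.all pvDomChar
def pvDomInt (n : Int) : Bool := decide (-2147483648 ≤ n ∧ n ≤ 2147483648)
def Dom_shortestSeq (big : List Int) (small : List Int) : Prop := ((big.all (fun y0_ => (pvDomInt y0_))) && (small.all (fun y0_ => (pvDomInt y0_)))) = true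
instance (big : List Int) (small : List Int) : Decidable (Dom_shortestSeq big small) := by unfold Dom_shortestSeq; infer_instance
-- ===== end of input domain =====

-- B replaces A's count-dict sliding window (shrinking left pointer) by a one-pass
-- last-occurrence table whose minimum value is the window's left end (objective: alternative).

-- ===== PORT A =====
-- The three dict statements of A's inner loop body, on a defaultdict:
-- `if big[l] in t: dic[big[l]] -= 1`, the key-creating read `dic[big[l]]`,
-- and `if dic[big[l]] == 0: dic.pop(big[l])`.
def shrinkDic (t : PySem.Set Int) (bl : Int) (dic : PySem.Dict Int Int) : PySem.Dict Int Int :=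
  let dic1 := if t.contains bl then dic.insert bl (dic.getD bl 0 - 1) else dic
  let dic2 := if (dic1.get? bl).isNone then dic1.insert bl 0 else dic1
  if dic2.getD bl 0 = 0 then dic2.erase bl else dic2

-- Inner `while len(dic) == k:` loop of A.  `fuel` only bounds the recursion; it is
-- large enough that it is never exhausted before Python's own exit points.  The
-- `none` branch of `pyGet? big l` is where Python raises IndexError (outside Pre_).
def aShrink (big : List Int) (t : PySem.Set Int) (k : Nat) (r : Nat) :
    Nat → Nat → PySem.Dict Int Int → List Int → Nat × PySem.Dict Int Int × List Int
  | 0, l, dic, res => (l, dic, res)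
  | fuel+1, l, dic, res =>
    if dic.size = k then
      -- if not res or r - l < res[1] - res[0]: res = [l, r]
      let res' := if res = [] ∨ (r : Int) - (l : Int) <
          (PySem.List.pyGet? res 1).getD 0 - (PySem.List.pyGet? res 0).getD 0
        then [(l : Int), (r : Int)] else res
      match PySem.List.pyGet? big (l : Int) with
      | none => (l, dic, res')  -- big[l] raises IndexError in Python
      | some bl => aShrink big t k r fuel (l+1) (shrinkDic t bl dic) res'
    else (l, dic, res)

-- Outer `while r < len(big):` loop; `rest` is big[r:], so the head of `rest` is big[r].
def aLoop (big : List Int) (t : PySem.Set Int) (k : Nat) :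
    List Int → Nat → Nat → PySem.Dict Int Int → List Int → List Int
  | [], _, _, _, res => res
  | v :: rest, r, l, dic, res =>
    -- if big[r] in t: dic[big[r]] += 1   (defaultdict)
    let dic1 := if t.contains v then dic.modify v 0 (· + 1) else dic
    let s := aShrink big t k r (big.length + 1) l dic1 res
    aLoop big t k rest (r+1) s.1 s.2.1 s.2.2

def shortestSeq (big : List Int) (small : List Int) : List Int :=
  aLoop big (PySem.Set.ofList small) small.length big 0 0 PySem.Dict.empty []

-- ===== PORT B =====
-- One step of B's `for r, x in enumerate(big):` loop.
def bStep (t : PySem.Set Int) (k : Nat) (st : PySem.Dict Int Int × List Int)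
    (pr : Int × Int) : PySem.Dict Int Int × List Int :=
  let last' := if t.contains pr.2 then st.1.insert pr.2 pr.1 else st.1
  if last'.size = k then
    match PySem.List.min? last'.values id with
    | some l =>
        if st.2 = [] ∨ pr.1 - l <
            (PySem.List.pyGet? st.2 1).getD 0 - (PySem.List.pyGet? st.2 0).getD 0
          then (last', [l, pr.1]) else (last', st.2)
    | none => (last', st.2)  -- min([]) raises ValueError; only with small = [], outside Pre_
  else (last', st.2)

def shortestSeq_alt (big : List Int) (small : List Int) : List Int :=
  ((PySem.List.enumerate big 0).foldl
    (bStep (PySem.Set.ofList small) small.length) (PySem.Dict.empty, [])).2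

-- ===== PRECONDITION & SPEC =====
-- Pre_ excludes exactly the inputs where A raises: empty `small` with nonempty `big`
-- makes A's inner loop run l past the end of big (IndexError); B raises there too (ValueError).
def Pre_shortestSeq (big : List Int) (small : List Int) : Prop := small ≠ [] ∨ big = []
instance (big : List Int) (small : List Int) : Decidable (Pre_shortestSeq big small) := by
  unfold Pre_shortestSeq; infer_instance

def pvWitness_shortestSeq : List Int × List Int := ([7, 5, 9, 0, 2, 1, 3, 5, 7, 9, 1, 1, 5, 8, 8, 9, 7], [1, 5, 9])

def Spec_shortestSeq (big : List Int) (small : List Int) (out : List Int) : Prop := out = shortestSeq_alt big small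
instance (big : List Int) (small : List Int) (out : List Int) : Decidable (Spec_shortestSeq big small out) := by unfold Spec_shortestSeq; infer_instance

-- ===== CLAIM (what is proved, stated in full; the proofs are below) =====
def Claim_equal_shortestSeq : Prop := ∀ (big : List Int) (small : List Int), Dom_shortestSeq big small → Pre_shortestSeq big small → Spec_shortestSeq big small (shortestSeq big small)

-- ===== LEMMAS AND PROOFS =====

-- Last index of x in p (meaningful when x ∈ p).
def locc (p : List Int) (x : Int) : Int := (p.length : Int) - 1 - (p.reverse.idxOf x : Int)

-- Net effect of A's inner loop (and of B's one candidate) on res at right end r, left end m.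
def resUpd (r m : Nat) (res : List Int) : List Int :=
  if res = [] ∨ (r : Int) - (m : Int) <
      (PySem.List.pyGet? res 1).getD 0 - (PySem.List.pyGet? res 0).getD 0
    then [(m : Int), (r : Int)] else res

-- Joint loop invariant after processing the prefix p of big.
def LoopInv (small p : List Int) (l : Nat) (dic last : PySem.Dict Int Int) (res : List Int) : Prop :=
  (∀ x, dic.get? x = if x ∈ PySem.Set.ofList small ∧ x ∈ p.drop l
      then some (((p.drop l).count x : Int)) else none) ∧
  dic.keys.Nodup ∧
  (∀ x, last.get? x = if x ∈ PySem.Set.ofList small ∧ x ∈ p then some (locc p x) else none) ∧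
  last.keys.Nodup ∧
  l ≤ p.length ∧
  (l = 0 → res = []) ∧
  (0 < l → ∃ a b : Int, res = [a, b] ∧ b - a ≤ (p.length : Int) - (l : Int))

-- a in l.take (l.idxOf a) is impossible: idxOf points at the FIRST occurrence
lemma not_mem_take_idxOf (a : Int) (l : List Int) : a ∉ l.take (l.idxOf a) := by
  induction l with
  | nil => simp
  | cons b t ih =>
    by_cases hb : b = a
    · subst hb; simp [List.idxOf_cons_self]
    · rw [List.idxOf_cons_ne _ (by simpa using hb)]
      simp only [List.take_succ_cons, List.mem_cons]
      rintro (h | h)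
      · exact hb h.symm
      · exact ih h

lemma idxOf_le_of_getElem (l : List Int) (a : Int) (j : Nat) (hj : j < l.length)
    (h : l[j] = a) : l.idxOf a ≤ j := by
  by_contra hc
  exact not_mem_take_idxOf a l
    (by rw [List.mem_take_iff_getElem]; exact ⟨j, by omega, h⟩)

lemma locc_append_self (p : List Int) (v : Int) : locc (p ++ [v]) v = (p.length : Int) := by
  unfold locc
  simp [List.idxOf_cons_self]

lemma locc_append_ne (p : List Int) (v x : Int) (h : x ≠ v) : locc (p ++ [v]) x = locc p x := by
  unfold locc
  have hrev : (p ++ [v]).reverse = v :: p.reverse := by simp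
  rw [hrev, List.idxOf_cons_ne _ (Ne.symm h)]
  simp only [List.length_append, List.length_cons, List.length_nil, Nat.succ_eq_add_one]
  push_cast
  omega

lemma locc_nonneg (p : List Int) (x : Int) (h : x ∈ p) : 0 ≤ locc p x := by
  have h1 := List.idxOf_lt_length_of_mem (List.mem_reverse.mpr h)
  rw [List.length_reverse] at h1
  unfold locc
  omega

lemma locc_lt_length (p : List Int) (x : Int) : locc p x < (p.length : Int) := by
  unfold locc
  omega

lemma getElem_locc (p : List Int) (x : Int) (h : x ∈ p) (hn : (locc p x).toNat < p.length) :
    p[(locc p x).toNat] = x := by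
  have h1 := List.idxOf_lt_length_of_mem (List.mem_reverse.mpr h)
  rw [List.length_reverse] at h1
  have hj : (locc p x).toNat = p.length - 1 - p.reverse.idxOf x := by unfold locc; omega
  have h2 : p[(locc p x).toNat] = p.reverse[p.length - 1 - (locc p x).toNat]'(by
      rw [List.length_reverse]; omega) :=
    List.getElem_eq_getElem_reverse hn
  rw [h2]
  have h3 : p.length - 1 - (locc p x).toNat = p.reverse.idxOf x := by omega
  simp_rw [h3]
  exact List.getElem_idxOf (by rw [List.length_reverse]; omega)

lemma mem_drop_iff_locc (p : List Int) (x : Int) (l : Nat) (hx : x ∈ p) :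
    x ∈ p.drop l ↔ (l : Int) ≤ locc p x := by
  constructor
  · intro hxd
    obtain ⟨i, hi, hgi⟩ := List.getElem_of_mem hxd
    rw [List.getElem_drop] at hgi
    rw [List.length_drop] at hi
    have hlen : l + i < p.length := by omega
    have hrev : p.reverse[p.length - 1 - (l + i)]'(by rw [List.length_reverse]; omega) = x := by
      rw [← List.getElem_eq_getElem_reverse hlen]; exact hgi
    have := idxOf_le_of_getElem p.reverse x (p.length - 1 - (l + i))
      (by rw [List.length_reverse]; omega) hrev
    unfold locc
    omega
  · intro hle
    have h0 := locc_nonneg p x hx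
    have hlt := locc_lt_length p x
    have hn : (locc p x).toNat < p.length := by omega
    have hg := getElem_locc p x hx hn
    have hmem : x ∈ p.drop l := by
      have : (p.drop l)[(locc p x).toNat - l]'(by rw [List.length_drop]; omega) = x := by
        rw [List.getElem_drop]
        have : l + ((locc p x).toNat - l) = (locc p x).toNat := by omega
        simp_rw [this]
        exact hg
      rw [← this]
      exact List.getElem_mem _
    exact hmem

lemma not_mem_drop_locc_succ (p : List Int) (x : Int) (hx : x ∈ p) :
    x ∉ p.drop ((locc p x).toNat + 1) := by
  intro hmem
  have h0 := locc_nonneg p x hx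
  have := (mem_drop_iff_locc p x ((locc p x).toNat + 1) hx).mp hmem
  omega

lemma dict_get?_erase (d : PySem.Dict Int Int) (kk x : Int) :
    (d.erase kk).get? x = if x = kk then none else d.get? x := by
  obtain ⟨items⟩ := d
  induction items with
  | nil => simp [PySem.Dict.erase, PySem.Dict.get?]
  | cons hd tl ih =>
    by_cases h1 : hd.1 = kk <;> by_cases h2 : hd.1 = x <;>
      simp_all [PySem.Dict.erase, PySem.Dict.get?]

lemma dict_nodup_keys_erase (d : PySem.Dict Int Int) (kk : Int) (h : d.keys.Nodup) :
    (d.erase kk).keys.Nodup := by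
  have hs : (d.erase kk).items.Sublist d.items := by
    simp only [PySem.Dict.erase]
    exact List.filter_sublist
  exact (hs.map Prod.fst).nodup h

lemma dict_size_eq_keys_length (d : PySem.Dict Int Int) : d.size = d.keys.length := by
  simp [PySem.Dict.size, PySem.Dict.keys]

lemma length_eq_of_nodup_iff (u w : List Int) (hu : u.Nodup) (hw : w.Nodup)
    (h : ∀ x, x ∈ u ↔ x ∈ w) : u.length = w.length :=
  ((List.perm_ext_iff_of_nodup hu hw).mpr h).length_eq

lemma length_lt_of_nodup_ssub (u w : List Int) (hu : u.Nodup) (hw : w.Nodup)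
    (hsub : ∀ x, x ∈ u → x ∈ w) (x₀ : Int) (h₀ : x₀ ∈ w) (h₁ : x₀ ∉ u) :
    u.length < w.length := by
  have hss : u.toFinset ⊂ w.toFinset := by
    constructor
    · intro x hx
      simp only [List.mem_toFinset] at *
      exact hsub x hx
    · intro hcon
      exact h₁ (by simpa using hcon (by simpa using h₀))
  calc u.length = u.toFinset.card := (List.toFinset_card_of_nodup hu).symm
    _ < w.toFinset.card := Finset.card_lt_card hss
    _ = w.length := List.toFinset_card_of_nodup hw

lemma filter_len_eq_iff (small : List Int) (Q : Int → Prop) [DecidablePred Q] :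
    ((PySem.Set.ofList small).filter (fun x => decide (Q x))).length = small.length
      ↔ small.Nodup ∧ ∀ x ∈ small, Q x := by
  have ht : (PySem.Set.ofList small : List Int).Nodup := PySem.Set.nodup_ofList small
  have hsub := List.filter_sublist (l := (PySem.Set.ofList small : List Int))
    (p := fun x => decide (Q x))
  have h1 := hsub.length_le
  have h2 := PySem.Set.length_ofList_le small
  constructor
  · intro h
    have hfe : (PySem.Set.ofList small).filter (fun x => decide (Q x))
        = PySem.Set.ofList small := hsub.eq_of_length (by omega)
    have htlen : (PySem.Set.ofList small : List Int).length = small.length := by omega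
    have hnd : small.Nodup := by
      have hfin : small.toFinset = (PySem.Set.ofList small : List Int).toFinset := by
        ext x
        simp [PySem.Set.mem_ofList]
      have hcard : small.dedup.length = small.length := by
        have := List.card_toFinset small
        rw [hfin, List.toFinset_card_of_nodup ht] at this
        omega
      have : small.dedup = small := (List.dedup_sublist small).eq_of_length hcard
      rw [← this]
      exact small.nodup_dedup
    refine ⟨hnd, fun x hx => ?_⟩
    have hxt : x ∈ (PySem.Set.ofList small : List Int) := (PySem.Set.mem_ofList small x).mpr hx
    rw [← hfe] at hxt
    simpa using List.of_mem_filter hxt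
  · rintro ⟨hnd, hQ⟩
    rw [PySem.Set.ofList_eq_self_of_nodup small hnd]
    rw [List.filter_eq_self.mpr (fun a ha => by simpa using hQ a ha)]

lemma foldl_min_eq (ys : List Int) (m : Int) :
    ∀ a : Int, m ≤ a → (a = m ∨ m ∈ ys) → (∀ y ∈ ys, m ≤ y) → ys.foldl min a = m := by
  induction ys with
  | nil =>
    rintro a hma (rfl | h)
    · simp
    · simp at h
  | cons y ys ih =>
    rintro a hma hmem hys
    simp only [List.foldl_cons]
    have hmy : m ≤ y := hys y (by simp)
    refine ih (min a y) (le_min hma hmy) ?_ (fun z hz => hys z (by simp [hz]))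
    rcases hmem with rfl | hm
    · left; omega
    · simp only [List.mem_cons] at hm
      rcases hm with rfl | hm
      · left; omega
      · right; exact hm

lemma min?_cons (a : Int) (ys : List Int) :
    PySem.List.min? (a :: ys) id = some (ys.foldl min a) := by
  induction ys generalizing a with
  | nil => simp [PySem.List.min?]
  | cons y ys ih =>
    have h1 : PySem.List.min? (a :: y :: ys) id = PySem.List.min? (min a y :: ys) id := by
      show List.foldl _ (if id y < id a then some y else some a) ys
        = List.foldl _ (some (min a y)) ys
      simp only [id]
      split_ifs with h
      · rw [(by omega : min a y = y)]
      · rw [(by omega : min a y = a)]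
    rw [h1, ih, List.foldl_cons]

lemma min?_eq_some_of (xs : List Int) (m : Int) (hmem : m ∈ xs) (hle : ∀ y ∈ xs, m ≤ y) :
    PySem.List.min? xs id = some m := by
  cases xs with
  | nil => simp at hmem
  | cons x rest =>
    rw [min?_cons x rest]
    congr 1
    apply foldl_min_eq rest m x (hle x (by simp))
    · simp only [List.mem_cons] at hmem
      tauto
    · exact fun y hy => hle y (by simp [hy])

lemma mem_keys_iff_of_inv (small c : List Int) (f : Int → Int) (dic : PySem.Dict Int Int)
    (I1 : ∀ x, dic.get? x = if x ∈ PySem.Set.ofList small ∧ x ∈ c then some (f x) else none)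
    (x : Int) : x ∈ dic.keys ↔ x ∈ PySem.Set.ofList small ∧ x ∈ c := by
  constructor
  · intro hx
    have hne : dic.get? x ≠ none := by
      intro h; exact (PySem.Dict.get?_eq_none_iff_not_mem_keys dic x).mp h hx
    rw [I1 x] at hne
    by_cases hc : x ∈ PySem.Set.ofList small ∧ x ∈ c
    · exact hc
    · rw [if_neg hc] at hne
      exact absurd rfl hne
  · intro hc
    have : dic.get? x = some (f x) := by rw [I1 x]; simp [hc.1, hc.2]
    by_contra hk
    rw [← PySem.Dict.get?_eq_none_iff_not_mem_keys] at hk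
    simp [hk] at this

lemma dic_size_eq (small c : List Int) (f : Int → Int) (dic : PySem.Dict Int Int)
    (I1 : ∀ x, dic.get? x = if x ∈ PySem.Set.ofList small ∧ x ∈ c then some (f x) else none)
    (hnd : dic.keys.Nodup) :
    dic.size = ((PySem.Set.ofList small).filter (fun x => decide (x ∈ c))).length := by
  rw [dict_size_eq_keys_length]
  apply length_eq_of_nodup_iff _ _ hnd ((PySem.Set.nodup_ofList small).filter _)
  intro x
  rw [mem_keys_iff_of_inv small c f dic I1 x, List.mem_filter]
  simp

lemma guard_iff (small c : List Int) (f : Int → Int) (dic : PySem.Dict Int Int)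
    (I1 : ∀ x, dic.get? x = if x ∈ PySem.Set.ofList small ∧ x ∈ c then some (f x) else none)
    (hnd : dic.keys.Nodup) :
    dic.size = small.length ↔ small.Nodup ∧ ∀ x ∈ small, x ∈ c := by
  rw [dic_size_eq small c f dic I1 hnd]
  exact filter_len_eq_iff small (fun x => x ∈ c)

-- get? through Python's `d[k] = f(d.get(k, dflt))`
lemma dict_get?_modify (d : PySem.Dict Int Int) (kk x : Int) (d0 : Int) (f : Int → Int) :
    (d.modify kk d0 f).get? x = if x = kk then some (f (d.getD kk d0)) else d.get? x := by
  by_cases h : x = kk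
  · subst h
    have hc : (d.modify x d0 f).contains x = true := by
      rw [PySem.Dict.contains_modify]; simp
    rw [PySem.Dict.contains_eq_isSome_get?] at hc
    obtain ⟨val, hval⟩ := Option.isSome_iff_exists.mp hc
    have := PySem.Dict.getD_modify_self d x d0 f
    rw [PySem.Dict.getD_eq_get?_getD, hval] at this
    simp only [Option.getD_some] at this
    rw [hval, this, if_pos rfl]
  · rw [if_neg h]
    have hc : (d.modify kk d0 f).contains x = d.contains x := by
      rw [PySem.Dict.contains_modify]
      simp [beq_iff_eq, h]
    by_cases hx : d.contains x = true
    · rw [PySem.Dict.contains_eq_isSome_get?] at hx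
      obtain ⟨val, hval⟩ := Option.isSome_iff_exists.mp hx
      have hx2 : ((d.modify kk d0 f).get? x).isSome := by
        rw [← PySem.Dict.contains_eq_isSome_get?, hc, PySem.Dict.contains_eq_isSome_get?, hval]
        rfl
      obtain ⟨val2, hval2⟩ := Option.isSome_iff_exists.mp hx2
      have hgd := PySem.Dict.getD_modify d kk x d0 f
      rw [if_neg h, PySem.Dict.getD_eq_get?_getD, PySem.Dict.getD_eq_get?_getD, hval, hval2] at hgd
      simp only [Option.getD_some] at hgd
      rw [hval, hval2, hgd]
    · have hx1 : d.get? x = none := by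
        rw [PySem.Dict.contains_eq_isSome_get?] at hx
        simpa using hx
      have hx2 : (d.modify kk d0 f).get? x = none := by
        have : (d.modify kk d0 f).contains x ≠ true := by rw [hc]; simpa [hx1] using hx
        rw [PySem.Dict.contains_eq_isSome_get?] at this
        simpa using this
      rw [hx1, hx2]

lemma dict_nodup_keys_modify (d : PySem.Dict Int Int) (kk : Int) (d0 : Int) (f : Int → Int)
    (h : d.keys.Nodup) : (d.modify kk d0 f).keys.Nodup := by
  rw [PySem.Dict.keys_modify]
  have := PySem.Dict.nodup_keys_insert d kk (f (d.getD kk d0)) h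
  exact this

lemma shrinkDic_spec (small q : List Int) (l : Nat) (hl : l < q.length)
    (dic : PySem.Dict Int Int)
    (I1 : ∀ x, dic.get? x = if x ∈ PySem.Set.ofList small ∧ x ∈ q.drop l
        then some (((q.drop l).count x : Int)) else none)
    (hnd : dic.keys.Nodup) :
    (∀ x, (shrinkDic (PySem.Set.ofList small) (q[l]'hl) dic).get? x
        = if x ∈ PySem.Set.ofList small ∧ x ∈ q.drop (l+1)
          then some (((q.drop (l+1)).count x : Int)) else none)
    ∧ (shrinkDic (PySem.Set.ofList small) (q[l]'hl) dic).keys.Nodup := by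
  have hdrop : q.drop l = q[l]'hl :: q.drop (l+1) := List.drop_eq_getElem_cons hl
  unfold shrinkDic
  cases hc : (PySem.Set.ofList small).contains (q[l]'hl) with
  | false =>
    have hblt : (q[l]'hl) ∉ PySem.Set.ofList small := by
      intro h
      have h2 := (PySem.Set.contains_iff _ _).mpr h
      rw [hc] at h2
      exact absurd h2 (by simp)
    have hgbl : dic.get? (q[l]'hl) = none := by rw [I1]; simp [hblt]
    simp only [Bool.false_eq_true, if_false, hgbl, Option.isNone_none, if_true]
    have hgd0 : (dic.insert (q[l]'hl) 0).getD (q[l]'hl) 0 = 0 :=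
      PySem.Dict.getD_insert_self dic _ _ _
    rw [if_pos hgd0]
    constructor
    · intro x
      rw [dict_get?_erase]
      by_cases hx : x = q[l]'hl
      · subst hx; simp [hblt]
      · rw [if_neg hx, PySem.Dict.get?_insert, if_neg hx]
        rw [I1 x, hdrop]
        simp only [List.count_cons, List.mem_cons]
        have hx' : (q[l]'hl) ≠ x := fun h => hx h.symm
        simp [hx, hx']
    · exact dict_nodup_keys_erase _ _ (PySem.Dict.nodup_keys_insert dic _ _ hnd)
  | true =>
    have hblt : (q[l]'hl) ∈ PySem.Set.ofList small := (PySem.Set.contains_iff _ _).mp hc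
    have hblm : (q[l]'hl) ∈ q.drop l := by
      have h0 : (q[l]'hl) ∈ (q[l]'hl) :: q.drop (l+1) := List.mem_cons_self ..
      rwa [← hdrop] at h0
    have hgbl : dic.get? (q[l]'hl) = some (((q.drop l).count (q[l]'hl) : Int)) := by
      rw [I1]; simp [hblt, hblm]
    have hc0 : (q.drop l).count (q[l]'hl) = (q.drop (l+1)).count (q[l]'hl) + 1 := by
      rw [hdrop, List.count_cons_self]
    have hgdbl : dic.getD (q[l]'hl) 0 = ((q.drop l).count (q[l]'hl) : Int) := by
      rw [PySem.Dict.getD_eq_get?_getD, hgbl]; rfl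
    simp only [if_true]
    have hg1 : (dic.insert (q[l]'hl) (dic.getD (q[l]'hl) 0 - 1)).get? (q[l]'hl)
        = some (((q.drop (l+1)).count (q[l]'hl) : Int)) := by
      rw [PySem.Dict.get?_insert_self, hgdbl]
      congr 1
      push_cast [hc0]
      ring
    simp only [hg1, Option.isNone_some, Bool.false_eq_true, if_false]
    have hgd1 : (dic.insert (q[l]'hl) (dic.getD (q[l]'hl) 0 - 1)).getD (q[l]'hl) 0
        = ((q.drop (l+1)).count (q[l]'hl) : Int) := by
      rw [PySem.Dict.getD_eq_get?_getD, hg1]; rfl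
    rw [hgd1]
    by_cases hz : ((q.drop (l+1)).count (q[l]'hl) : Int) = 0
    · rw [if_pos hz]
      have hznat : (q.drop (l+1)).count (q[l]'hl) = 0 := by exact_mod_cast hz
      constructor
      · intro x
        rw [dict_get?_erase]
        by_cases hx : x = q[l]'hl
        · subst hx
          rw [if_pos rfl]
          have hnm : (q[l]'hl) ∉ q.drop (l+1) := List.count_eq_zero.mp hznat
          simp [hnm]
        · rw [if_neg hx, PySem.Dict.get?_insert, if_neg hx]
          rw [I1 x, hdrop]
          simp only [List.count_cons, List.mem_cons]
          have hx' : (q[l]'hl) ≠ x := fun h => hx h.symm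
          simp [hx, hx']
      · exact dict_nodup_keys_erase _ _ (PySem.Dict.nodup_keys_insert dic _ _ hnd)
    · rw [if_neg hz]
      constructor
      · intro x
        by_cases hx : x = q[l]'hl
        · subst hx
          rw [hg1]
          have hmem : (q[l]'hl) ∈ q.drop (l+1) := by
            have hznat : (q.drop (l+1)).count (q[l]'hl) ≠ 0 := by exact_mod_cast hz
            exact List.count_pos_iff.mp (Nat.pos_of_ne_zero hznat)
          simp [hblt, hmem]
        · rw [PySem.Dict.get?_insert, if_neg hx]
          rw [I1 x, hdrop]
          simp only [List.count_cons, List.mem_cons]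
          have hx' : (q[l]'hl) ≠ x := fun h => hx h.symm
          simp [hx, hx']
      · exact PySem.Dict.nodup_keys_insert dic _ _ hnd

lemma resUpd_cand (r l m : Nat) (hlm : l < m) (res : List Int)
    (hres : res = [] ∨ ∃ a b : Int, res = [a, b]) :
    resUpd r m (if res = [] ∨ (r : Int) - (l : Int) <
        (PySem.List.pyGet? res 1).getD 0 - (PySem.List.pyGet? res 0).getD 0
      then [(l : Int), (r : Int)] else res) = resUpd r m res := by
  rcases hres with rfl | ⟨a, b, rfl⟩
  · simp only [resUpd]
    norm_num
    intro _ h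
    omega
  · have hp0 : (PySem.List.pyGet? [a, b] 0).getD 0 = a := rfl
    have hp1 : (PySem.List.pyGet? [a, b] 1).getD 0 = b := rfl
    have hq0 : (PySem.List.pyGet? [(l : Int), (r : Int)] 0).getD 0 = (l : Int) := rfl
    have hq1 : (PySem.List.pyGet? [(l : Int), (r : Int)] 1).getD 0 = (r : Int) := rfl
    simp only [resUpd, hp0, hp1]
    have hab : ([a, b] : List Int) ≠ [] := by simp
    have hlr : ([(l : Int), (r : Int)] : List Int) ≠ [] := by simp
    split_ifs <;> first
      | (simp_all; omega)
      | simp_all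

lemma shrink_spec (big small q rest : List Int) (r : Nat)
    (hbig : big = q ++ rest) (hq : q.length = r + 1) (hnds : small.Nodup)
    (m : Nat) (x₀ : Int) (hx₀ : x₀ ∈ PySem.Set.ofList small) (hx₀m : locc q x₀ = (m : Int))
    (hmin : ∀ x ∈ PySem.Set.ofList small, (m : Int) ≤ locc q x)
    (hall : ∀ x ∈ PySem.Set.ofList small, x ∈ q) :
    ∀ fuel l dic res, l ≤ m → m + 2 - l ≤ fuel →
    (∀ x, dic.get? x = if x ∈ PySem.Set.ofList small ∧ x ∈ q.drop l
        then some (((q.drop l).count x : Int)) else none) →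
    dic.keys.Nodup →
    (res = [] ∨ ∃ a b : Int, res = [a, b]) →
    ∃ dic', aShrink big (PySem.Set.ofList small) small.length r fuel l dic res
        = (m + 1, dic', resUpd r m res)
      ∧ (∀ x, dic'.get? x = if x ∈ PySem.Set.ofList small ∧ x ∈ q.drop (m+1)
          then some (((q.drop (m+1)).count x : Int)) else none)
      ∧ dic'.keys.Nodup := by
  have hml : (m : Int) < (q.length : Int) := hx₀m ▸ locc_lt_length q x₀
  have hmq : m < q.length := by exact_mod_cast hml
  intro fuel
  induction fuel with
  | zero => intro l dic res hlm hfuel; omega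
  | succ n ih =>
    intro l dic res hlm hfuel I1 hnd hres
    have hlq : l < q.length := by omega
    have hcomp : ∀ x ∈ small, x ∈ q.drop l := by
      intro x hx
      have hxt : x ∈ PySem.Set.ofList small := (PySem.Set.mem_ofList small x).mpr hx
      have hx2 := hmin x hxt
      rw [mem_drop_iff_locc q x l (hall x hxt)]
      omega
    have hguard : dic.size = small.length :=
      (guard_iff small (q.drop l) (fun x => (((q.drop l).count x : Int))) dic I1 hnd).mpr
        ⟨hnds, hcomp⟩
    have hget : PySem.List.pyGet? big (l : Int) = some (q[l]'hlq) := by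
      rw [PySem.List.pyGet?_natCast, hbig, List.getElem?_append_left hlq]
      simp [hlq]
    simp only [aShrink]
    rw [if_pos hguard, hget]
    simp only []
    obtain ⟨I1', hnd'⟩ := shrinkDic_spec small q l hlq dic I1 hnd
    by_cases hlm2 : l = m
    · subst hlm2
      obtain ⟨n', rfl⟩ : ∃ n', n = n' + 1 := ⟨n - 1, by omega⟩
      simp only [aShrink]
      have hx₀q : x₀ ∈ q := hall x₀ hx₀
      have hx₀not : x₀ ∉ q.drop (l+1) := by
        have h0 := not_mem_drop_locc_succ q x₀ hx₀q
        rw [hx₀m] at h0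
        simpa using h0
      have hsz := dic_size_eq small (q.drop (l+1))
        (fun x => (((q.drop (l+1)).count x : Int))) _ I1' hnd'
      have hlt : ((PySem.Set.ofList small).filter
          (fun x => decide (x ∈ q.drop (l+1)))).length < small.length := by
        have h1 := length_lt_of_nodup_ssub
          ((PySem.Set.ofList small).filter (fun x => decide (x ∈ q.drop (l+1))))
          (PySem.Set.ofList small)
          ((PySem.Set.nodup_ofList small).filter _)
          (PySem.Set.nodup_ofList small)
          (fun x hx => (List.mem_filter.mp hx).1)
          x₀ hx₀
          (fun hcon => hx₀not (by simpa using (List.mem_filter.mp hcon).2))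
        have h2 : (PySem.Set.ofList small : List Int).length = small.length := by
          rw [PySem.Set.ofList_eq_self_of_nodup small hnds]
        omega
      rw [if_neg (by rw [hsz]; omega)]
      exact ⟨_, rfl, I1', hnd'⟩
    · have hlm3 : l < m := by omega
      obtain ⟨dic', heq, hI, hnd2⟩ := ih (l+1)
        (shrinkDic (PySem.Set.ofList small) (q[l]'hlq) dic)
        (if res = [] ∨ (r : Int) - (l : Int) <
            (PySem.List.pyGet? res 1).getD 0 - (PySem.List.pyGet? res 0).getD 0
          then [(l : Int), (r : Int)] else res)
        (by omega) (by omega) I1' hnd'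
        (by split_ifs with h
            · exact Or.inr ⟨_, _, rfl⟩
            · exact hres)
      refine ⟨dic', ?_, hI, hnd2⟩
      rw [heq, resUpd_cand r l m hlm3 res hres]

lemma exists_min_locc (t : List Int) (p : List Int) (h : t ≠ []) :
    ∃ x₀ ∈ t, ∀ x ∈ t, locc p x₀ ≤ locc p x := by
  obtain ⟨a, ha, hmin⟩ := t.toFinset.exists_min_image (locc p)
    (by simpa [List.toFinset_eq_empty_iff] using h)
  exact ⟨a, by simpa using ha, fun b hb => hmin b (by simpa using hb)⟩

-- state of A's count dict after `if big[r] in t: dic[big[r]] += 1`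
lemma dic1_spec (small p : List Int) (v : Int) (l : Nat) (hlp : l ≤ p.length)
    (dic : PySem.Dict Int Int)
    (I1 : ∀ x, dic.get? x = if x ∈ PySem.Set.ofList small ∧ x ∈ p.drop l
        then some (((p.drop l).count x : Int)) else none) :
    ∀ x, (if (PySem.Set.ofList small).contains v then dic.modify v 0 (· + 1) else dic).get? x
      = if x ∈ PySem.Set.ofList small ∧ x ∈ (p ++ [v]).drop l
        then some ((((p ++ [v]).drop l).count x : Int)) else none := by
  intro x
  rw [List.drop_append_of_le_length hlp]
  cases hc : (PySem.Set.ofList small).contains v with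
  | false =>
    have hvt : v ∉ PySem.Set.ofList small := by
      intro hmem
      have h2 := (PySem.Set.contains_iff _ _).mpr hmem
      rw [hc] at h2
      exact absurd h2 (by simp)
    rw [if_neg (by simp), I1 x]
    by_cases hx : x = v
    · subst hx; simp [hvt]
    · have hx' : v ≠ x := fun h => hx h.symm
      simp only [List.count_append, List.mem_append, List.mem_singleton,
        List.count_singleton]
      simp [hx, hx']
  | true =>
    have hvt : v ∈ PySem.Set.ofList small := (PySem.Set.contains_iff _ _).mp hc
    rw [if_pos rfl, dict_get?_modify]
    by_cases hx : x = v
    · subst hx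
      rw [if_pos rfl]
      have hgd : dic.getD x 0 = (((p.drop l).count x : Int)) := by
        rw [PySem.Dict.getD_eq_get?_getD, I1 x]
        by_cases hm : x ∈ p.drop l
        · simp [hvt, hm]
        · rw [List.count_eq_zero.mpr hm]
          simp [hvt, hm]
      rw [hgd]
      simp only [List.count_append, List.mem_append, List.mem_singleton,
        List.count_singleton]
      simp [hvt]
    · have hx' : v ≠ x := fun h => hx h.symm
      rw [if_neg hx, I1 x]
      simp only [List.count_append, List.mem_append, List.mem_singleton,
        List.count_singleton]
      simp [hx, hx']

-- state of B's last-occurrence dict after `if x in t: last[x] = r`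
lemma last1_spec (small p : List Int) (v : Int) (last : PySem.Dict Int Int)
    (I3 : ∀ x, last.get? x = if x ∈ PySem.Set.ofList small ∧ x ∈ p
        then some (locc p x) else none) :
    ∀ x, (if (PySem.Set.ofList small).contains v
          then last.insert v ((p.length : Int)) else last).get? x
      = if x ∈ PySem.Set.ofList small ∧ x ∈ p ++ [v]
        then some (locc (p ++ [v]) x) else none := by
  intro x
  cases hc : (PySem.Set.ofList small).contains v with
  | false =>
    have hvt : v ∉ PySem.Set.ofList small := by
      intro hmem
      have h2 := (PySem.Set.contains_iff _ _).mpr hmem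
      rw [hc] at h2
      exact absurd h2 (by simp)
    rw [if_neg (by simp), I3 x]
    by_cases hx : x = v
    · subst hx; simp [hvt]
    · rw [locc_append_ne p v x hx]
      simp [List.mem_append, hx]
  | true =>
    have hvt : v ∈ PySem.Set.ofList small := (PySem.Set.contains_iff _ _).mp hc
    rw [if_pos rfl, PySem.Dict.get?_insert]
    by_cases hx : x = v
    · subst hx
      rw [if_pos rfl, locc_append_self]
      simp [hvt]
    · rw [if_neg hx, I3 x, locc_append_ne p v x hx]
      simp [List.mem_append, hx]

lemma loop_eq (big small : List Int) (hsm : small ≠ []) :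
    ∀ (rest p : List Int) (l : Nat) (dic last : PySem.Dict Int Int) (res : List Int),
    big = p ++ rest →
    LoopInv small p l dic last res →
    aLoop big (PySem.Set.ofList small) small.length rest p.length l dic res
      = ((PySem.List.enumerate rest (p.length : Int)).foldl
          (bStep (PySem.Set.ofList small) small.length) (last, res)).2 := by
  intro rest
  induction rest with
  | nil =>
    intro p l dic last res hbig hInv
    simp [aLoop, PySem.List.enumerate_nil]
  | cons v rest' ih =>
    intro p l dic last res hbig hInv
    obtain ⟨I1, hndD, I3, hndL, hlp, hres0, hres1⟩ := hInv
    have hbig' : big = (p ++ [v]) ++ rest' := by rw [hbig]; simp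
    have hplen : (p ++ [v]).length = p.length + 1 := by simp
    have htne : (PySem.Set.ofList small : List Int) ≠ [] := by
      cases small with
      | nil => exact absurd rfl hsm
      | cons a as =>
        intro h
        have hmem : a ∈ PySem.Set.ofList (a :: as) := by
          rw [PySem.Set.mem_ofList]; simp
        rw [h] at hmem
        simp at hmem
    have hI1' := dic1_spec small p v l hlp dic I1
    have hnd1 : (if (PySem.Set.ofList small).contains v
        then dic.modify v 0 (· + 1) else dic).keys.Nodup := by
      split_ifs
      · exact dict_nodup_keys_modify dic v 0 _ hndD
      · exact hndD
    have hI3' := last1_spec small p v last I3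
    have hndL1 : (if (PySem.Set.ofList small).contains v
        then last.insert v ((p.length : Int)) else last).keys.Nodup := by
      split_ifs
      · exact PySem.Dict.nodup_keys_insert last v _ hndL
      · exact hndL
    have hresShape : res = [] ∨ ∃ a b : Int, res = [a, b] := by
      rcases Nat.eq_zero_or_pos l with h0 | h0
      · exact Or.inl (hres0 h0)
      · obtain ⟨a, b, hab, _⟩ := hres1 h0
        exact Or.inr ⟨a, b, hab⟩
    simp only [aLoop, PySem.List.enumerate_cons, List.foldl_cons]
    by_cases hAg : (if (PySem.Set.ofList small).contains v
        then dic.modify v 0 (· + 1) else dic).size = small.length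
    · -- A's window is complete: both sides record the candidate window
      obtain ⟨hnds, hcompD⟩ :=
        (guard_iff small ((p ++ [v]).drop l) _ _ hI1' hnd1).mp hAg
      have hallp' : ∀ x ∈ PySem.Set.ofList small, x ∈ p ++ [v] := by
        intro x hx
        exact List.mem_of_mem_drop (hcompD x ((PySem.Set.mem_ofList small x).mp hx))
      obtain ⟨x₀, hx₀t, hx₀min⟩ := exists_min_locc (PySem.Set.ofList small) (p ++ [v]) htne
      have hx₀drop : x₀ ∈ (p ++ [v]).drop l :=
        hcompD x₀ ((PySem.Set.mem_ofList small x₀).mp hx₀t)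
      have hlm : (l : Int) ≤ locc (p ++ [v]) x₀ :=
        (mem_drop_iff_locc _ x₀ l (hallp' x₀ hx₀t)).mp hx₀drop
      have hm0 : 0 ≤ locc (p ++ [v]) x₀ := le_trans (by omega) hlm
      set mnat := (locc (p ++ [v]) x₀).toNat with hmnatdef
      have hmnat : (mnat : Int) = locc (p ++ [v]) x₀ := Int.toNat_of_nonneg hm0
      have hmlt : mnat < (p ++ [v]).length := by
        have := locc_lt_length (p ++ [v]) x₀
        omega
      have hblen : (p ++ [v]).length ≤ big.length := by
        rw [hbig']; simp
      obtain ⟨dic', heqA, hI1'', hnd''⟩ := shrink_spec big small (p ++ [v]) rest' p.length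
        hbig' (by simp) hnds mnat x₀ hx₀t hmnat.symm
        (fun x hx => hmnat ▸ hx₀min x hx) hallp'
        (big.length + 1) l _ res (by omega) (by omega) hI1' hnd1 hresShape
      -- B fires too and computes the same left end
      have hBg : (if (PySem.Set.ofList small).contains v
          then last.insert v ((p.length : Int)) else last).size = small.length :=
        (guard_iff small (p ++ [v]) _ _ hI3' hndL1).mpr
          ⟨hnds, fun x hx => hallp' x ((PySem.Set.mem_ofList small x).mpr hx)⟩
      have hkeys : ∀ x, x ∈ (if (PySem.Set.ofList small).contains v
          then last.insert v ((p.length : Int)) else last).keys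
            ↔ x ∈ PySem.Set.ofList small := by
        intro x
        rw [mem_keys_iff_of_inv small (p ++ [v]) _ _ hI3' x]
        exact ⟨fun h => h.1, fun h => ⟨h, hallp' x h⟩⟩
      have hvals : (if (PySem.Set.ofList small).contains v
          then last.insert v ((p.length : Int)) else last).values
          = (if (PySem.Set.ofList small).contains v
          then last.insert v ((p.length : Int)) else last).keys.map
            (fun kk => (if (PySem.Set.ofList small).contains v
          then last.insert v ((p.length : Int)) else last).getD kk 0) :=
        PySem.Dict.values_eq_map_keys _ hndL1 0
      have hgetDlocc : ∀ x ∈ PySem.Set.ofList small,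
          (if (PySem.Set.ofList small).contains v
            then last.insert v ((p.length : Int)) else last).getD x 0
          = locc (p ++ [v]) x := by
        intro x hx
        rw [PySem.Dict.getD_eq_get?_getD, hI3' x]
        simp [hx, hallp' x hx]
      have hminv : PySem.List.min? (if (PySem.Set.ofList small).contains v
          then last.insert v ((p.length : Int)) else last).values id
          = some (locc (p ++ [v]) x₀) := by
        apply min?_eq_some_of
        · rw [hvals]
          refine List.mem_map.mpr ⟨x₀, (hkeys x₀).mpr hx₀t, hgetDlocc x₀ hx₀t⟩
        · intro y hy
          rw [hvals] at hy
          obtain ⟨x, hxk, hxy⟩ := List.mem_map.mp hy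
          have hxt := (hkeys x).mp hxk
          rw [hgetDlocc x hxt] at hxy
          rw [← hxy]
          exact hx₀min x hxt
      have hB : bStep (PySem.Set.ofList small) small.length (last, res) ((p.length : Int), v)
          = (if (PySem.Set.ofList small).contains v
              then last.insert v ((p.length : Int)) else last,
             resUpd p.length mnat res) := by
        simp only [bStep, hminv]
        rw [if_pos hBg]
        rw [resUpd, ← hmnat]
        split_ifs <;> rfl
      rw [heqA, hB]
      have hfix : ((p.length : Nat) + 1) = (p ++ [v]).length := hplen.symm
      have hfixI : ((p.length : Int) + 1) = (((p ++ [v]).length : Nat) : Int) := by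
        push_cast [hplen]; ring
      rw [hfix, hfixI]
      apply ih (p ++ [v]) (mnat + 1) dic' _ (resUpd p.length mnat res) hbig'
      refine ⟨hI1'', hnd'', hI3', hndL1, by omega, by omega, ?_⟩
      intro _
      rw [resUpd]
      split_ifs with hcnd
      · refine ⟨(mnat : Int), (p.length : Int), rfl, by push_cast [hplen]; omega⟩
      · rcases hresShape with rfl | ⟨a, b, rfl⟩
        · exact absurd (Or.inl rfl) hcnd
        · have hwa : (PySem.List.pyGet? [a, b] 1).getD 0 = b := rfl
          have hwb : (PySem.List.pyGet? [a, b] 0).getD 0 = a := rfl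
          rw [hwa, hwb] at hcnd
          refine ⟨a, b, rfl, ?_⟩
          push_cast [hplen]
          omega
    · -- A's window is not complete: A leaves its state unchanged
      have hsA : aShrink big (PySem.Set.ofList small) small.length p.length
          (big.length + 1) l (if (PySem.Set.ofList small).contains v
            then dic.modify v 0 (· + 1) else dic) res
          = (l, (if (PySem.Set.ofList small).contains v
            then dic.modify v 0 (· + 1) else dic), res) := by
        simp only [aShrink]
        rw [if_neg hAg]
      rw [hsA]
      have hfix : ((p.length : Nat) + 1) = (p ++ [v]).length := hplen.symm
      have hfixI : ((p.length : Int) + 1) = (((p ++ [v]).length : Nat) : Int) := by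
        push_cast [hplen]; ring
      by_cases hBg : (if (PySem.Set.ofList small).contains v
          then last.insert v ((p.length : Int)) else last).size = small.length
      · -- B's table is full but the candidate window is wider: B keeps res
        obtain ⟨hnds, hallsm⟩ := (guard_iff small (p ++ [v]) _ _ hI3' hndL1).mp hBg
        have hallp' : ∀ x ∈ PySem.Set.ofList small, x ∈ p ++ [v] :=
          fun x hx => hallsm x ((PySem.Set.mem_ofList small x).mp hx)
        have hnotall : ¬ ∀ x ∈ small, x ∈ (p ++ [v]).drop l := by
          intro hall
          exact hAg ((guard_iff small ((p ++ [v]).drop l) _ _ hI1' hnd1).mpr ⟨hnds, hall⟩)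
        obtain ⟨x₁, hx₁s, hx₁nd⟩ := not_forall₂.mp hnotall
        have hx₁t : x₁ ∈ PySem.Set.ofList small := (PySem.Set.mem_ofList small x₁).mpr hx₁s
        have hx₁p : x₁ ∈ p ++ [v] := hallp' x₁ hx₁t
        have hx₁loc : locc (p ++ [v]) x₁ < (l : Int) := by
          have := (mem_drop_iff_locc (p ++ [v]) x₁ l hx₁p).not.mp hx₁nd
          omega
        have hx₁0 : 0 ≤ locc (p ++ [v]) x₁ := locc_nonneg _ x₁ hx₁p
        have hl0 : 0 < l := by omega
        obtain ⟨a, b, hab, hw⟩ := hres1 hl0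
        obtain ⟨x₀, hx₀t, hx₀min⟩ := exists_min_locc (PySem.Set.ofList small) (p ++ [v]) htne
        have hgetDlocc : ∀ x ∈ PySem.Set.ofList small,
            (if (PySem.Set.ofList small).contains v
              then last.insert v ((p.length : Int)) else last).getD x 0
            = locc (p ++ [v]) x := by
          intro x hx
          rw [PySem.Dict.getD_eq_get?_getD, hI3' x]
          simp [hx, hallp' x hx]
        have hkeys : ∀ x, x ∈ (if (PySem.Set.ofList small).contains v
            then last.insert v ((p.length : Int)) else last).keys
              ↔ x ∈ PySem.Set.ofList small := by
          intro x
          rw [mem_keys_iff_of_inv small (p ++ [v]) _ _ hI3' x]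
          exact ⟨fun h => h.1, fun h => ⟨h, hallp' x h⟩⟩
        have hvals := PySem.Dict.values_eq_map_keys (if (PySem.Set.ofList small).contains v
            then last.insert v ((p.length : Int)) else last) hndL1 0
        have hminv : PySem.List.min? (if (PySem.Set.ofList small).contains v
            then last.insert v ((p.length : Int)) else last).values id
            = some (locc (p ++ [v]) x₀) := by
          apply min?_eq_some_of
          · rw [hvals]
            exact List.mem_map.mpr ⟨x₀, (hkeys x₀).mpr hx₀t, hgetDlocc x₀ hx₀t⟩
          · intro y hy
            rw [hvals] at hy
            obtain ⟨x, hxk, hxy⟩ := List.mem_map.mp hy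
            have hxt := (hkeys x).mp hxk
            rw [hgetDlocc x hxt] at hxy
            rw [← hxy]
            exact hx₀min x hxt
        have hB : bStep (PySem.Set.ofList small) small.length (last, res)
            ((p.length : Int), v)
            = (if (PySem.Set.ofList small).contains v
                then last.insert v ((p.length : Int)) else last, res) := by
          simp only [bStep, hminv]
          rw [if_pos hBg]
          rw [if_neg]
          subst hab
          rintro (hemp | hlt)
          · simp at hemp
          · have hwa : (PySem.List.pyGet? [a, b] 1).getD 0 = b := rfl
            have hwb : (PySem.List.pyGet? [a, b] 0).getD 0 = a := rfl
            rw [hwa, hwb] at hlt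
            have hm₀ := hx₀min x₁ hx₁t
            omega
        rw [hB]
        rw [hfix, hfixI]
        apply ih (p ++ [v]) l _ _ res hbig'
        refine ⟨hI1', hnd1, hI3', hndL1, by omega, fun h => absurd h (by omega), ?_⟩
        intro _
        refine ⟨a, b, hab, by push_cast [hplen]; omega⟩
      · -- B's table is not full either: B keeps res
        have hB : bStep (PySem.Set.ofList small) small.length (last, res)
            ((p.length : Int), v)
            = (if (PySem.Set.ofList small).contains v
                then last.insert v ((p.length : Int)) else last, res) := by
          simp only [bStep]
          rw [if_neg hBg]
        rw [hB]
        rw [hfix, hfixI]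
        apply ih (p ++ [v]) l _ _ res hbig'
        refine ⟨hI1', hnd1, hI3', hndL1, by omega, hres0, ?_⟩
        intro h0
        obtain ⟨a, b, hab, hw⟩ := hres1 h0
        refine ⟨a, b, hab, by push_cast [hplen]; omega⟩

theorem shortestSeq_spec : Claim_equal_shortestSeq := by
  intro big small _ hpre
  unfold Spec_shortestSeq
  by_cases hsm : small = []
  · rcases hpre with h | h
    · exact absurd hsm h
    · subst h; subst hsm; rfl
  · have h := loop_eq big small hsm big [] 0 PySem.Dict.empty PySem.Dict.empty [] rfl ?_
    · simpa [shortestSeq, shortestSeq_alt] using h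
    · refine ⟨?_, ?_, ?_, ?_, ?_, ?_, ?_⟩ <;>
        simp [PySem.Dict.get?_empty, PySem.Dict.keys_empty]
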